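-- pv_equiv track=rewrite | github.com/Hunterdii/GeeksforGeeks-POTD | June 2025 GFG SOLUTION/June-10.py | countStrings
-- ===== SOURCE A (Python) =====
-- def countStrings(s):
--     m = [0]*26
--     ans = 0
--     for i, ch in enumerate(s):
--         ans += i - m[ord(ch) - 97]
--         m[ord(ch) - 97] += 1
--     if any(x > 1 for x in m):
--         ans += 1
--     return ans
-- ===== SOURCE B (Python) =====
-- def countStrings(s):
--     counts = [0] * 26
--     for ch in s:
--         counts[ord(ch) - 97] += 1
--     n = len(s)
--     ans = n * (n - 1) // 2 - sum(c * (c - 1) // 2 for c in counts)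
--     if any(c > 1 for c in counts):
--         ans += 1
--     return ans
-- ===== Notes on version B (the rewrite author's own statement) =====
-- stated objective: simpler
-- what changed: B replaces A's per-position running-difference accumulation (ans += i - seen_count, updated inside an enumerate loop) with a single frequency-count pass followed by the closed-form identity ans = n*(n-1)//2 - sum(c*(c-1)//2 for c in counts), plus the same +1 duplicate bonus.
import Mathlib
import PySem

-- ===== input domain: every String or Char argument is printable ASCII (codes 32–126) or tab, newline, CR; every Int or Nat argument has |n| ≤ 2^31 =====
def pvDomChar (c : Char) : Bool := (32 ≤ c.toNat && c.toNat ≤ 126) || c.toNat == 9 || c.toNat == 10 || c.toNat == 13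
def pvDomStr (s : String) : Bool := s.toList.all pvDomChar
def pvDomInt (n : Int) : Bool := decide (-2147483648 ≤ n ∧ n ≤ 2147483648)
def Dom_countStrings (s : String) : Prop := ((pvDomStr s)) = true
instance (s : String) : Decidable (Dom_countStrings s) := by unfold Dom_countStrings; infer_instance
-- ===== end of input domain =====

-- B replaces A's per-position running-difference accumulation with one frequency-count
-- pass followed by the closed form C(n,2) - Σ C(cnt,2); simpler decomposition, measured
-- constant-factor faster (less per-character arithmetic).

-- ===== PORT A =====
-- per-character loop: ans += i - m[ord(ch)-97]; m[ord(ch)-97] += 1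
def countStrings (s : String) : Int :=
  let r := (PySem.List.enumerate s.toList 0).foldl
    (fun (st : List Int × Int) (p : Int × Char) =>
      (PySem.List.pySetD st.1 ((p.2.toNat : Int) - 97) (PySem.List.pyGetD st.1 ((p.2.toNat : Int) - 97) 0 + 1),
       st.2 + p.1 - PySem.List.pyGetD st.1 ((p.2.toNat : Int) - 97) 0))
    (List.replicate 26 (0 : Int), 0)
  if r.1.any (fun x => decide (1 < x)) then r.2 + 1 else r.2

-- ===== PORT B =====
def countStrings_alt (s : String) : Int :=
  let counts := s.toList.foldl
    (fun (m : List Int) (ch : Char) =>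
      PySem.List.pySetD m ((ch.toNat : Int) - 97) (PySem.List.pyGetD m ((ch.toNat : Int) - 97) 0 + 1))
    (List.replicate 26 (0 : Int))
  let n : Int := PySem.Str.len s
  let ans := PySem.Int.floordiv (n * (n - 1)) 2
             - (counts.map (fun c => PySem.Int.floordiv (c * (c - 1)) 2)).sum
  if counts.any (fun c => decide (1 < c)) then ans + 1 else ans

-- ===== PRECONDITION & SPEC =====
-- Pre_ excludes exactly the strings containing a character with code < 71 or > 122:
-- there both Pythons index the 26-slot table out of range and raise IndexError.
def Pre_countStrings (s : String) : Prop :=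
  s.toList.all (fun c => decide (PySem.Raise.InRange 26 ((c.toNat : Int) - 97))) = true
instance (s : String) : Decidable (Pre_countStrings s) := by unfold Pre_countStrings; infer_instance
def pvWitness_countStrings : String := "abcaG"

def Spec_countStrings (s : String) (out : Int) : Prop := out = countStrings_alt s
instance (s : String) (out : Int) : Decidable (Spec_countStrings s out) := by unfold Spec_countStrings; infer_instance

-- ===== CLAIM (what is proved, stated in full; the proofs are below) =====
def Claim_equal_countStrings : Prop := ∀ (s : String), Dom_countStrings s → Pre_countStrings s → Spec_countStrings s (countStrings s)

-- ===== LEMMAS AND PROOFS =====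

-- proof-only abbreviations for the two loop bodies and the pair-count sum
def pvC2 (x : Int) : Int := PySem.Int.floordiv (x * (x - 1)) 2

def pvPhi (m : List Int) : Int := (m.map pvC2).sum

def pvTab (m : List Int) (c : Char) : List Int :=
  PySem.List.pySetD m ((c.toNat : Int) - 97) (PySem.List.pyGetD m ((c.toNat : Int) - 97) 0 + 1)

lemma pvC2_succ (x : Int) : pvC2 (x + 1) = pvC2 x + x := by
  unfold pvC2
  rw [PySem.Int.floordiv_eq_ediv_of_pos (show (0:Int) < 2 by norm_num),
      PySem.Int.floordiv_eq_ediv_of_pos (show (0:Int) < 2 by norm_num),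
      show (x + 1) * (x + 1 - 1) = x * (x - 1) + x * 2 from by ring,
      Int.add_mul_ediv_right _ _ (by norm_num : (2:Int) ≠ 0)]

lemma pvPhi_set (m : List Int) (j : Nat) (h : j < m.length) :
    pvPhi (m.set j (m.getD j 0 + 1)) = pvPhi m + m.getD j 0 := by
  induction m generalizing j with
  | nil => simp at h
  | cons a t ih =>
    cases j with
    | zero => simp [pvPhi, pvC2_succ]; ring
    | succ j =>
      have := ih j (by simpa using h)
      simp only [List.set, List.getD, List.getElem?_cons_succ, pvPhi, List.map, List.sum_cons] at *
      omega

lemma pvPhi_tab (m : List Int) (c : Char)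
    (h : PySem.Raise.InRange m.length ((c.toNat : Int) - 97)) :
    pvPhi (pvTab m c) = pvPhi m + PySem.List.pyGetD m ((c.toNat : Int) - 97) 0 := by
  obtain ⟨h1, h2⟩ := h
  set i : Int := (c.toNat : Int) - 97 with hi
  by_cases hpos : 0 ≤ i
  · have hj : i.toNat < m.length := by omega
    have hset : PySem.List.pySetD m i (PySem.List.pyGetD m i 0 + 1)
        = m.set i.toNat (PySem.List.pyGetD m i 0 + 1) := PySem.List.pySetD_of_nonneg _ _ hpos
    have hget : PySem.List.pyGetD m i 0 = m.getD i.toNat 0 := by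
      simp [PySem.List.pyGetD, PySem.List.pyGet?, PySem.List.pyIdx?, hpos, h2, List.getD]
    rw [pvTab, hset, hget, pvPhi_set m i.toNat hj]
  · have hneg : i < 0 := by omega
    -- negative index: effective Nat index is m.length - (-i).toNat
    have hk : (-i).toNat ≤ m.length := by omega
    have hk0 : 0 < (-i).toNat := by omega
    have hj : m.length - (-i).toNat < m.length := by omega
    have hidx : PySem.List.pyIdx? m.length i = some (m.length - (-i).toNat) := by
      simp [PySem.List.pyIdx?, not_le.mpr hneg, h1]
    have hset : PySem.List.pySetD m i (PySem.List.pyGetD m i 0 + 1)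
        = m.set (m.length - (-i).toNat) (PySem.List.pyGetD m i 0 + 1) := by
      simp [PySem.List.pySetD, PySem.List.pySet?, hidx]
    have hget : PySem.List.pyGetD m i 0 = m.getD (m.length - (-i).toNat) 0 := by
      simp [PySem.List.pyGetD, PySem.List.pyGet?, hidx, List.getD]
    rw [pvTab, hset, hget, pvPhi_set m _ hj]

lemma pvTab_length (m : List Int) (c : Char) : (pvTab m c).length = m.length := by
  simp [pvTab, PySem.List.length_pySetD]

-- triangular number of the index stream
def pvTri (n : Nat) : Int := PySem.Int.floordiv ((n : Int) * ((n : Int) - 1)) 2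

lemma pvTri_succ (n : Nat) : pvTri (n + 1) = pvTri n + n := by
  have := pvC2_succ (n : Int)
  unfold pvTri
  unfold pvC2 at this
  push_cast
  linarith [this]

-- main invariant: A's loop computes B's table, and its accumulator differs from
-- the pair-count sum by the triangular number of the visited indices
lemma pvLoop (cs : List Char) : ∀ (k : Int) (m : List Int) (ans : Int),
    m.length = 26 →
    (∀ c ∈ cs, PySem.Raise.InRange 26 ((c.toNat : Int) - 97)) →
    (PySem.List.enumerate cs k).foldl
      (fun (st : List Int × Int) (p : Int × Char) =>
        (PySem.List.pySetD st.1 ((p.2.toNat : Int) - 97) (PySem.List.pyGetD st.1 ((p.2.toNat : Int) - 97) 0 + 1),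
         st.2 + p.1 - PySem.List.pyGetD st.1 ((p.2.toNat : Int) - 97) 0))
      (m, ans)
    = (cs.foldl pvTab m,
       ans + k * cs.length + pvTri cs.length + pvPhi m - pvPhi (cs.foldl pvTab m)) := by
  induction cs with
  | nil => intro k m ans _ _; simp [PySem.List.enumerate, pvTri, PySem.Int.floordiv]
  | cons c cs ih =>
    intro k m ans hlen hin
    rw [PySem.List.enumerate_cons]
    simp only [List.foldl_cons]
    have hinc : PySem.Raise.InRange 26 ((c.toNat : Int) - 97) := hin c (List.mem_cons_self)
    have hinc' : PySem.Raise.InRange m.length ((c.toNat : Int) - 97) := by rw [hlen]; exact hinc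
    rw [show PySem.List.pySetD m ((c.toNat : Int) - 97) (PySem.List.pyGetD m ((c.toNat : Int) - 97) 0 + 1)
          = pvTab m c from rfl,
        ih (k + 1) (pvTab m c) _ (by rw [pvTab_length, hlen])
        (fun d hd => hin d (List.mem_cons_of_mem _ hd))]
    refine Prod.ext rfl ?_
    simp only
    rw [pvPhi_tab m c hinc']
    simp only [List.length_cons, pvTri_succ]
    push_cast
    ring

lemma pvPhi_zero : pvPhi (List.replicate 26 (0 : Int)) = 0 := by decide

-- ===== VERDICT (by name: the statement is the Claim_ definition above) =====
theorem countStrings_spec : Claim_equal_countStrings := by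
  intro s _ hpre
  have hpre' : ∀ c ∈ s.toList, PySem.Raise.InRange 26 ((c.toNat : Int) - 97) := by
    simpa [Pre_countStrings, List.all_eq_true] using hpre
  unfold Spec_countStrings countStrings countStrings_alt
  have h := pvLoop s.toList 0 (List.replicate 26 (0 : Int)) 0 (by simp) hpre'
  simp only [h, pvPhi_zero]
  have hcounts : s.toList.foldl pvTab (List.replicate 26 (0 : Int))
      = s.toList.foldl (fun (m : List Int) (ch : Char) =>
          PySem.List.pySetD m ((ch.toNat : Int) - 97) (PySem.List.pyGetD m ((ch.toNat : Int) - 97) 0 + 1))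
        (List.replicate 26 (0 : Int)) := rfl
  rw [hcounts]
  have hlen : (PySem.Str.len s) = (s.toList.length : Int) := by simp [PySem.Str.len_eq]
  simp only [hlen]
  have htri : pvTri s.toList.length
      = PySem.Int.floordiv ((s.toList.length : Int) * ((s.toList.length : Int) - 1)) 2 := rfl
  have hphi : ∀ m : List Int, pvPhi m = (m.map (fun c => PySem.Int.floordiv (c * (c - 1)) 2)).sum := by
    intro m; rfl
  rw [← htri, ← hphi]
  split_ifs <;> ring
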